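-- pv_equiv track=rewrite | github.com/ddariiiia/MMSiM | 1 lab.py | decode_baudot
-- ===== SOURCE A (Python) =====
-- def decode_baudot(binary_sequence):
--     baudot_to_char = {
--         "00000": " ", "00001": "А", "00010": "Б", "00011": "В", "00100": "Г",
--         "00101": "Д", "00110": "Е", "00111": "Ё", "01000": "Ж", "01001": "З",
--         "01010": "И", "01011": "Й", "01100": "К", "01101": "Л", "01110": "М",
--         "01111": "Н", "10000": "О", "10001": "П", "10010": "Р", "10011": "С",
--         "10100": "Т", "10101": "У", "10110": "Ф", "10111": "Х", "11000": "Ц",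
--         "11001": "Ч", "11010": "Ш", "11011": "Щ", "11100": "Ъ", "11101": "Ы",
--         "11110": "Ь", "11111": "Э"
--     }
--
--     decoded_text = ""
--     # Разбиваем последовательность на пятибитовые части и декодируем каждую часть
--     for i in range(0, len(binary_sequence), 5):
--         byte = binary_sequence[i:i+5]
--         if byte in baudot_to_char:
--             decoded_text += baudot_to_char[byte]
--     return binary_sequence, decoded_text
-- ===== SOURCE B (Python) =====
-- # B: single left-to-right character scan with a Horner-style bit accumulator and a
-- # validity flag; indexes an ordered alphabet string instead of a per-chunk dict lookup.
-- ALPHABET = " АБВГДЕЁЖЗИЙКЛМНОПРСТУФХЦЧШЩЪЫЬЭ"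
--
-- def decode_baudot(binary_sequence):
--     n = len(binary_sequence)
--     out = []
--     val = 0
--     ok = True
--     for pos in range(n - n % 5):   # only complete 5-char chunks can decode
--         c = binary_sequence[pos]
--         if c == '0':
--             val = 2 * val
--         elif c == '1':
--             val = 2 * val + 1
--         else:
--             ok = False
--         if pos % 5 == 4:
--             if ok:
--                 out.append(ALPHABET[val])
--             val = 0
--             ok = True
--     return binary_sequence, "".join(out)
-- ===== Notes on version B (the rewrite author's own statement) =====
-- stated objective: alternative
-- what changed: Replaces the per-chunk dict lookup over 5-character slices by a single left-to-right character scan that accumulates each code with Horner's rule (val = 2*val + bit) plus a validity flag, and indexes an ordered alphabet string; no slicing and no dict.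
import Mathlib
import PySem

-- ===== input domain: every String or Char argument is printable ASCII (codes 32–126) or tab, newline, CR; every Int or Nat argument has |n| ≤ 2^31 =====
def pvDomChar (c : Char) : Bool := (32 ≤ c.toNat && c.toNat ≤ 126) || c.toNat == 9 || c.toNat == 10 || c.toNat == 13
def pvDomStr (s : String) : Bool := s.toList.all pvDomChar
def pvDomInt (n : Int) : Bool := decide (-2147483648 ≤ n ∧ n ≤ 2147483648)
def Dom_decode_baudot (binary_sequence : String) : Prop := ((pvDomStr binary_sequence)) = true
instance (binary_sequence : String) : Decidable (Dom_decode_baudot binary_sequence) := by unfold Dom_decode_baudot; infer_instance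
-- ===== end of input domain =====

-- B replaces the per-chunk dict lookup over 5-char slices by a single character scan with a
-- Horner-style bit accumulator and a validity flag, indexing an ordered alphabet (alternative).

-- ===== PORT A =====
-- A's dict, keyed by the 5-character binary strings (strings as List Char)
def pvBaudotDict : PySem.Dict (List Char) Char :=
  PySem.Dict.ofList [
    (['0','0','0','0','0'], ' '),
    (['0','0','0','0','1'], 'А'),
    (['0','0','0','1','0'], 'Б'),
    (['0','0','0','1','1'], 'В'),
    (['0','0','1','0','0'], 'Г'),
    (['0','0','1','0','1'], 'Д'),
    (['0','0','1','1','0'], 'Е'),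
    (['0','0','1','1','1'], 'Ё'),
    (['0','1','0','0','0'], 'Ж'),
    (['0','1','0','0','1'], 'З'),
    (['0','1','0','1','0'], 'И'),
    (['0','1','0','1','1'], 'Й'),
    (['0','1','1','0','0'], 'К'),
    (['0','1','1','0','1'], 'Л'),
    (['0','1','1','1','0'], 'М'),
    (['0','1','1','1','1'], 'Н'),
    (['1','0','0','0','0'], 'О'),
    (['1','0','0','0','1'], 'П'),
    (['1','0','0','1','0'], 'Р'),
    (['1','0','0','1','1'], 'С'),
    (['1','0','1','0','0'], 'Т'),
    (['1','0','1','0','1'], 'У'),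
    (['1','0','1','1','0'], 'Ф'),
    (['1','0','1','1','1'], 'Х'),
    (['1','1','0','0','0'], 'Ц'),
    (['1','1','0','0','1'], 'Ч'),
    (['1','1','0','1','0'], 'Ш'),
    (['1','1','0','1','1'], 'Щ'),
    (['1','1','1','0','0'], 'Ъ'),
    (['1','1','1','0','1'], 'Ы'),
    (['1','1','1','1','0'], 'Ь'),
    (['1','1','1','1','1'], 'Э')]

-- the loop 'for i in range(0, len(s), 5): byte = s[i:i+5]; if byte in dict: decoded += dict[byte]'
def pvDecodeA (cs : List Char) : List Char :=
  (PySem.List.pyRange 0 (PySem.List.len cs) 5).foldl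
    (fun acc i =>
      let byte := PySem.List.slice cs (some i) (some (i + 5))
      if pvBaudotDict.contains byte then acc ++ [pvBaudotDict.getD byte ' '] else acc)
    []

def decode_baudot (binary_sequence : String) : String × String :=
  (binary_sequence, String.ofList (pvDecodeA binary_sequence.toList))

-- ===== PORT B =====
def pvAlphabet : List Char :=
  [' ','А','Б','В','Г','Д','Е','Ё','Ж','З','И','Й','К','Л','М','Н','О','П','Р','С','Т','У','Ф','Х','Ц','Ч','Ш','Щ','Ъ','Ы','Ь','Э']

-- one iteration of Source B's loop body; state (out, val, ok), input (pos, c)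
def pvStepB (st : List Char × Int × Bool) (pc : Int × Char) : List Char × Int × Bool :=
  let pv : Int × Bool :=
    if pc.2 == '0' then (2 * st.2.1, st.2.2)
    else if pc.2 == '1' then (2 * st.2.1 + 1, st.2.2)
    else (st.2.1, false)
  if PySem.Int.mod pc.1 5 == 4 then
    ((if pv.2 then st.1 ++ [PySem.List.pyGetD pvAlphabet pv.1 ' '] else st.1), 0, true)
  else (st.1, pv.1, pv.2)

def pvDecodeB (cs : List Char) : List Char :=
  let n : Int := PySem.List.len cs
  ((PySem.List.pyRange 0 (n - PySem.Int.mod n 5) 1).foldl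
      (fun st pos => pvStepB st (pos, PySem.List.pyGetD cs pos ' ')) ([], 0, true)).1

def decode_baudot_alt (binary_sequence : String) : String × String :=
  (binary_sequence, String.ofList (pvDecodeB binary_sequence.toList))

-- ===== PRECONDITION & SPEC =====
def Spec_decode_baudot (binary_sequence : String) (out : String × String) : Prop := out = decode_baudot_alt binary_sequence
instance (binary_sequence : String) (out : String × String) : Decidable (Spec_decode_baudot binary_sequence out) := by unfold Spec_decode_baudot; infer_instance

-- ===== CLAIM (what is proved, stated in full; the proofs are below) =====
def Claim_equal_decode_baudot : Prop := ∀ (binary_sequence : String), Dom_decode_baudot binary_sequence → Spec_decode_baudot binary_sequence (decode_baudot binary_sequence)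

-- ===== LEMMAS AND PROOFS =====

-- the decoded contribution of one chunk, as A computes it
def pvChunkA (b : List Char) : List Char :=
  if pvBaudotDict.contains b then [pvBaudotDict.getD b ' '] else []

-- reference: the decoded contribution of one chunk, stated arithmetically
def pvChunkRes (b : List Char) : List Char :=
  if b.length = 5 ∧ b.all (fun c => c == '0' || c == '1') = true then
    [PySem.List.pyGetD pvAlphabet (b.foldl (fun v c => if c == '1' then 2 * v + 1 else 2 * v) 0) ' ']
  else []

-- reference: decode chunk by chunk
def pvSpecChunks (cs : List Char) : List Char :=
  if h : cs = [] then [] else pvChunkRes (cs.take 5) ++ pvSpecChunks (cs.drop 5)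
  termination_by cs.length
  decreasing_by
    cases cs with
    | nil => exact absurd rfl h
    | cons a t => simp

lemma pvSpecChunks_nil : pvSpecChunks [] = [] := by simp [pvSpecChunks]

lemma pvSpecChunks_cons (cs : List Char) (h : cs ≠ []) :
    pvSpecChunks cs = pvChunkRes (cs.take 5) ++ pvSpecChunks (cs.drop 5) := by
  rw [pvSpecChunks]; simp [h]

lemma pvSpecChunks_short (cs : List Char) (h : cs.length < 5) : pvSpecChunks cs = [] := by
  by_cases hn : cs = []
  · simp [hn, pvSpecChunks_nil]
  · rw [pvSpecChunks_cons cs hn]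
    have h1 : pvChunkRes (cs.take 5) = [] := by
      unfold pvChunkRes
      rw [if_neg]
      rintro ⟨hl, -⟩
      simp at hl
      omega
    have h2 : cs.drop 5 = [] := by
      apply List.eq_nil_of_length_eq_zero; simp; omega
    simp [h1, h2, pvSpecChunks_nil]

-- every key of A's dict is a 5-character binary string
lemma pvKeys_shape : ∀ k ∈ pvBaudotDict.keys, k.length = 5 ∧ k.all (fun c => c == '0' || c == '1') = true := by
  decide

lemma pvChunkA_eq_chunkRes (b : List Char) : pvChunkA b = pvChunkRes b := by
  by_cases hb : b.length = 5 ∧ b.all (fun c => c == '0' || c == '1') = true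
  · obtain ⟨hl, ha⟩ := hb
    obtain ⟨c0, c1, c2, c3, c4, rfl⟩ : ∃ c0 c1 c2 c3 c4, b = [c0, c1, c2, c3, c4] := by
      rcases b with _ | ⟨c0, _ | ⟨c1, _ | ⟨c2, _ | ⟨c3, _ | ⟨c4, _ | ⟨c5, t⟩⟩⟩⟩⟩⟩ <;>
        simp_all
    simp only [List.all_cons, List.all_nil, Bool.and_true, Bool.and_eq_true,
      Bool.or_eq_true, beq_iff_eq] at ha
    obtain ⟨h0, h1, h2, h3, h4⟩ := ha
    rcases h0 with rfl | rfl <;> rcases h1 with rfl | rfl <;> rcases h2 with rfl | rfl <;>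
      rcases h3 with rfl | rfl <;> rcases h4 with rfl | rfl <;> decide
  · have hc : pvBaudotDict.contains b = false := by
      rw [PySem.Dict.contains_eq_decide_mem_keys]
      simp only [decide_eq_false_iff_not]
      intro hmem
      exact hb (pvKeys_shape b hmem)
    rw [pvChunkA, if_neg (by simp [hc]), pvChunkRes, if_neg hb]

-- ---- A side ----

lemma pvRange5_nil (m : Int) (hm : m ≤ 0) : PySem.List.pyRange 0 m 5 = [] := by
  rw [PySem.List.pyRange_of_pos 0 m (by norm_num : (0 : Int) < 5)]
  simp [show ¬(0 : Int) < m by omega]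

lemma pvRange5_cons (n : Int) (hn : 0 < n) :
    PySem.List.pyRange 0 n 5 = 0 :: (PySem.List.pyRange 0 (n - 5) 5).map (· + 5) := by
  rw [PySem.List.pyRange_of_pos 0 n (by norm_num : (0 : Int) < 5),
    PySem.List.pyRange_of_pos 0 (n - 5) (by norm_num : (0 : Int) < 5)]
  have hcount : (if (0 : Int) < n then ((n - 0 + 5 - 1) / 5).toNat else 0)
      = (if (0 : Int) < n - 5 then ((n - 5 - 0 + 5 - 1) / 5).toNat else 0) + 1 := by
    split_ifs <;> omega
  rw [hcount, List.range_succ_eq_map]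
  simp only [List.map_cons, List.map_map]
  congr 1

lemma pvDecodeA_eq (cs : List Char) :
    pvDecodeA cs = ((PySem.List.pyRange 0 (PySem.List.len cs) 5).filter
        (fun i => pvBaudotDict.contains (PySem.List.slice cs (some i) (some (i + 5))))).map
        (fun i => pvBaudotDict.getD (PySem.List.slice cs (some i) (some (i + 5))) ' ') := by
  simp only [pvDecodeA]
  rw [PySem.List.foldl_append_if]
  simp

lemma pvSliceShift (cs : List Char) (i : Int) (hi : 0 ≤ i) :
    PySem.List.slice cs (some (i + 5)) (some (i + 5 + 5)) =
      PySem.List.slice (cs.drop 5) (some i) (some (i + 5)) := by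
  rw [PySem.List.slice_toNat _ (by omega) (by omega), PySem.List.slice_toNat _ hi (by omega)]
  have e1 : (i + 5).toNat = 5 + i.toNat := by omega
  have e2 : (i + 5 + 5).toNat - (i + 5).toNat = 5 := by omega
  have e3 : (i + 5).toNat - i.toNat = 5 := by omega
  rw [e2, e3, e1, ← List.drop_drop]

lemma pvDecodeA_cons (cs : List Char) (h : cs ≠ []) :
    pvDecodeA cs = pvChunkA (cs.take 5) ++ pvDecodeA (cs.drop 5) := by
  have hn : 0 < ((cs.length : Int)) := by
    simp [List.length_pos_iff, h]
  rw [pvDecodeA_eq, pvDecodeA_eq]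
  simp only [PySem.List.len_eq]
  rw [pvRange5_cons _ hn]
  rw [List.filter_cons]
  have hs0 : PySem.List.slice cs (some 0) (some (0 + 5)) = cs.take 5 := by
    rw [show ((0 : Int) + 5) = 5 by norm_num]
    simp [PySem.List.slice_toNat cs (le_refl 0) (by norm_num : (0:Int) ≤ 5)]
  have hdroplen : ((cs.drop 5).length : Int) = max 0 ((cs.length : Int) - 5) := by
    simp; omega
  have htail :
      (List.filter (fun i => pvBaudotDict.contains (PySem.List.slice cs (some i) (some (i + 5))))
          ((PySem.List.pyRange 0 ((cs.length : Int) - 5) 5).map (· + 5))).map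
        (fun i => pvBaudotDict.getD (PySem.List.slice cs (some i) (some (i + 5))) ' ')
      = (List.filter
          (fun i => pvBaudotDict.contains (PySem.List.slice (cs.drop 5) (some i) (some (i + 5))))
          (PySem.List.pyRange 0 (((cs.drop 5).length : Int)) 5)).map
        (fun i => pvBaudotDict.getD (PySem.List.slice (cs.drop 5) (some i) (some (i + 5))) ' ') := by
    have hrange : PySem.List.pyRange 0 ((cs.length : Int) - 5) 5
        = PySem.List.pyRange 0 (((cs.drop 5).length : Int)) 5 := by
      by_cases h5 : (5 : Int) ≤ (cs.length : Int)
      · congr 1; omega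
      · rw [pvRange5_nil _ (by omega), pvRange5_nil _ (by omega)]
    rw [← hrange, List.filter_map, List.map_map]
    have hmem : ∀ i ∈ PySem.List.pyRange 0 ((cs.length : Int) - 5) 5, 0 ≤ i := by
      intro i hi
      rw [PySem.List.pyRange_of_pos 0 _ (by norm_num : (0 : Int) < 5)] at hi
      obtain ⟨k, _, rfl⟩ := List.mem_map.mp hi
      positivity
    rw [List.map_congr_left, List.filter_congr]
    · intro i hi
      simp only [Function.comp]
      rw [pvSliceShift cs i (hmem i hi)]
    · intro i hi
      have := hmem i (List.mem_of_mem_filter hi)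
      simp only [Function.comp]
      rw [pvSliceShift cs i this]
  rw [hs0]
  split_ifs with hcont
  · simp only [List.map_cons, hs0, pvChunkA, hcont, if_pos rfl]
    rw [htail]
    simp [pvChunkA, hcont]
  · rw [htail]
    simp [pvChunkA, hcont]

lemma pvDecodeA_specN : ∀ (N : Nat) (cs : List Char), cs.length = N → pvDecodeA cs = pvSpecChunks cs := by
  intro N
  induction N using Nat.strong_induction_on with
  | _ N IH =>
    intro cs hN
    by_cases h : cs = []
    · subst h
      rw [pvSpecChunks_nil, pvDecodeA_eq]
      simp [pvRange5_nil 0 (le_refl 0)]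
    · rw [pvDecodeA_cons cs h, pvChunkA_eq_chunkRes, pvSpecChunks_cons cs h]
      congr 1
      have hlt : (cs.drop 5).length < N := by
        have : 0 < cs.length := List.length_pos_iff.mpr h
        simp
        omega
      exact IH _ hlt _ rfl

lemma pvDecodeA_spec (cs : List Char) : pvDecodeA cs = pvSpecChunks cs :=
  pvDecodeA_specN _ cs rfl

-- ---- B side ----

-- the bit update of one loop iteration of B
def pvBit (c : Char) (v : Int) : Int := if c == '0' then 2*v else if c == '1' then 2*v+1 else v

lemma pvStepB_eq (out : List Char) (v : Int) (ok : Bool) (pos : Int) (c : Char) :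
    pvStepB (out, v, ok) (pos, c) =
      if PySem.Int.mod pos 5 == 4 then
        ((if ok && (c == '0' || c == '1') then
            out ++ [PySem.List.pyGetD pvAlphabet (pvBit c v) ' '] else out), 0, true)
      else (out, pvBit c v, ok && (c == '0' || c == '1')) := by
  by_cases h0 : c == '0' <;> by_cases h1 : c == '1' <;>
    simp [pvStepB, pvBit, h0, h1]

lemma pvChunkStep (c0 c1 c2 c3 c4 : Char) (out : List Char) (s : Int)
    (hm : s % 5 = 0) :
    List.foldl pvStepB (out, 0, true)
        [(s, c0), (s + 1, c1), (s + 1 + 1, c2), (s + 1 + 1 + 1, c3), (s + 1 + 1 + 1 + 1, c4)]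
      = (out ++ pvChunkRes [c0, c1, c2, c3, c4], 0, true) := by
  have hmod : ∀ a : Int, PySem.Int.mod a 5 = a % 5 := fun a =>
    PySem.Int.mod_eq_emod_of_pos (by norm_num)
  have m0 : (PySem.Int.mod s 5 == 4) = false := by rw [hmod]; simp; omega
  have m1 : (PySem.Int.mod (s+1) 5 == 4) = false := by rw [hmod]; simp; omega
  have m2 : (PySem.Int.mod (s+1+1) 5 == 4) = false := by rw [hmod]; simp; omega
  have m3 : (PySem.Int.mod (s+1+1+1) 5 == 4) = false := by rw [hmod]; simp; omega
  have m4 : (PySem.Int.mod (s+1+1+1+1) 5 == 4) = true := by rw [hmod]; simp; omega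
  simp only [List.foldl_cons, List.foldl_nil, pvStepB_eq, m0, m1, m2, m3, m4,
    Bool.false_eq_true, if_false, if_true, Bool.true_and]
  by_cases hall : (((((c0 == '0' || c0 == '1') && (c1 == '0' || c1 == '1')) && (c2 == '0' || c2 == '1')) && (c3 == '0' || c3 == '1')) && (c4 == '0' || c4 == '1')) = true
  · have hb := hall
    simp only [Bool.and_eq_true, Bool.or_eq_true, beq_iff_eq] at hb
    obtain ⟨⟨⟨⟨h0, h1⟩, h2⟩, h3⟩, h4⟩ := hb
    rcases h0 with rfl | rfl <;> rcases h1 with rfl | rfl <;> rcases h2 with rfl | rfl <;>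
      rcases h3 with rfl | rfl <;> rcases h4 with rfl | rfl <;>
        simp [pvChunkRes, pvBit, PySem.List.pyGetD, pvAlphabet]
  · rw [Bool.not_eq_true] at hall
    simp only [hall, Bool.false_eq_true, if_false]
    have hres : pvChunkRes [c0, c1, c2, c3, c4] = [] := by
      rw [pvChunkRes, if_neg]
      rintro ⟨-, ha⟩
      simp only [List.all_cons, List.all_nil, Bool.and_true] at ha
      rw [← Bool.and_assoc, ← Bool.and_assoc, ← Bool.and_assoc] at ha
      exact absurd ha (by simp [hall])
    rw [hres, List.append_nil]

lemma pvFoldB : ∀ (N : Nat) (ys : List Char), ys.length = N → ys.length % 5 = 0 →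
    ∀ (s : Int) (out : List Char), s % 5 = 0 →
      (PySem.List.enumerate ys s).foldl pvStepB (out, 0, true) = (out ++ pvSpecChunks ys, 0, true) := by
  intro N
  induction N using Nat.strong_induction_on with
  | _ N IH =>
    intro ys hN hlen s out hs
    rcases ys with _ | ⟨c0, _ | ⟨c1, _ | ⟨c2, _ | ⟨c3, _ | ⟨c4, rest⟩⟩⟩⟩⟩
    · simp [PySem.List.enumerate_nil, pvSpecChunks_nil]
    · simp at hlen
    · simp at hlen
    · simp at hlen
    · simp at hlen
    have henum : PySem.List.enumerate (c0 :: c1 :: c2 :: c3 :: c4 :: rest) s =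
        [(s, c0), (s + 1, c1), (s + 1 + 1, c2), (s + 1 + 1 + 1, c3), (s + 1 + 1 + 1 + 1, c4)] ++
          PySem.List.enumerate rest (s + 1 + 1 + 1 + 1 + 1) := by
      simp [PySem.List.enumerate_cons]
    rw [henum, List.foldl_append, pvChunkStep c0 c1 c2 c3 c4 out s hs]
    have hrest : (PySem.List.enumerate rest (s + 1 + 1 + 1 + 1 + 1)).foldl pvStepB
        (out ++ pvChunkRes [c0, c1, c2, c3, c4], 0, true)
        = (out ++ pvChunkRes [c0, c1, c2, c3, c4] ++ pvSpecChunks rest, 0, true) := by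
      apply IH rest.length (by simp at hN ⊢; omega) rest rfl (by simp at hlen; omega) _ _ (by omega)
    rw [hrest, pvSpecChunks_cons (c0 :: c1 :: c2 :: c3 :: c4 :: rest) (by simp)]
    simp [List.append_assoc]

lemma pvSpecChunks_full : ∀ (N : Nat) (cs : List Char), cs.length = N →
    pvSpecChunks (cs.take (cs.length - cs.length % 5)) = pvSpecChunks cs := by
  intro N
  induction N using Nat.strong_induction_on with
  | _ N IH =>
    intro cs hN
    by_cases h5 : cs.length < 5
    · rw [show cs.length - cs.length % 5 = 0 by omega]
      rw [List.take_zero, pvSpecChunks_nil, pvSpecChunks_short cs h5]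
    · have hk : 5 ≤ cs.length - cs.length % 5 := by omega
      have hne : cs.take (cs.length - cs.length % 5) ≠ [] := by
        intro hcontra
        have := congrArg List.length hcontra
        simp at this
        omega
      rw [pvSpecChunks_cons _ hne, pvSpecChunks_cons cs (by intro hc; subst hc; simp at h5)]
      congr 1
      · congr 1
        rw [List.take_take]
        congr 1
        omega
      · rw [List.drop_take]
        have harith : cs.length - cs.length % 5 - 5
            = (cs.drop 5).length - (cs.drop 5).length % 5 := by
          simp
          omega
        rw [harith]
        exact IH (cs.drop 5).length (by simp; omega) (cs.drop 5) rfl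

lemma pvDecodeB_spec (cs : List Char) : pvDecodeB cs = pvSpecChunks cs := by
  have hmodn : PySem.Int.mod (cs.length : Int) 5 = ((cs.length % 5 : Nat) : Int) := by
    rw [PySem.Int.mod_eq_emod_of_pos (by norm_num)]
    omega
  have hfull : ((cs.length : Int)) - PySem.Int.mod (cs.length : Int) 5
      = ((cs.length - cs.length % 5 : Nat) : Int) := by
    rw [hmodn]; omega
  set k : Nat := cs.length - cs.length % 5 with hk
  have hlenys : (cs.take k).length = k := by
    simp [hk]
  simp only [pvDecodeB, PySem.List.len_eq, hfull]
  have hcong : (PySem.List.pyRange 0 ((k : Nat) : Int) 1).foldl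
        (fun st pos => pvStepB st (pos, PySem.List.pyGetD cs pos ' ')) ([], 0, true)
      = (PySem.List.pyRange 0 ((k : Nat) : Int) 1).foldl
        (fun st pos => pvStepB st (pos, PySem.List.pyGetD (cs.take k) pos ' ')) ([], 0, true) := by
    apply PySem.List.foldl_congr_mem
    intro acc pos hpos
    rw [PySem.List.mem_pyRange_one] at hpos
    have hposlt : pos < ((cs.take k).length : Int) := by rw [hlenys]; exact hpos.2
    have hposlt' : pos < ((cs.length : Int)) := by
      rw [hlenys] at hposlt
      have : (k : Int) ≤ (cs.length : Int) := by omega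
      omega
    rw [PySem.List.pyGetD_eq_getElem cs ' ' hpos.1 hposlt',
      PySem.List.pyGetD_eq_getElem (cs.take k) ' ' hpos.1 hposlt]
    congr 1
    rw [List.getElem_take]
  rw [hcong]
  have henum : (PySem.List.enumerate (cs.take k)).foldl pvStepB ([], 0, true)
      = (PySem.List.pyRange 0 ((k : Nat) : Int) 1).foldl
          (fun st pos => pvStepB st (pos, PySem.List.pyGetD (cs.take k) pos ' ')) ([], 0, true) := by
    rw [PySem.List.enumerate_eq_map_pyRange (cs.take k) ' ', List.foldl_map]
    rw [PySem.List.len_eq, hlenys]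
  rw [← henum]
  have := pvFoldB (cs.take k).length (cs.take k) rfl (by rw [hlenys]; omega) 0 [] (by norm_num)
  rw [this]
  simp only [List.nil_append]
  exact pvSpecChunks_full cs.length cs rfl


-- ===== VERDICT (by name: the statement is the Claim_ definition above) =====
theorem decode_baudot_spec : Claim_equal_decode_baudot := by
  intro s _
  unfold Spec_decode_baudot decode_baudot decode_baudot_alt
  rw [pvDecodeA_spec, pvDecodeB_spec]
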